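-- pv_equiv track=rewrite | github.com/PurffleStore/pykara | list.py | _index_display_name
-- ===== SOURCE A (Python) =====
-- from typing import Dict, List, Any, Optional
--
-- def _index_display_name(code: str, markets: Dict[str, Dict[str, List[Dict[str, str]]]]) -> str:
--     cu = code.upper()
--     for _country, exchanges in markets.items():
--         for _exch, refs in exchanges.items():
--             for ref in refs:
--                 if ref["code"].upper() == cu:
--                     return ref.get("name", cu)
--     return cu
-- ===== SOURCE B (Python) =====
-- def _index_display_name(code, markets):
--     cu = code.upper()
--     idx = {}
--     for exchanges in markets.values():
--         for refs in exchanges.values():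
--             for ref in refs:
--                 c = ref.get("code")
--                 if c is not None:
--                     k = c.upper()
--                     if k not in idx:
--                         idx[k] = ref.get("name", cu)
--     return idx.get(cu, cu)
-- ===== Notes on version B (the rewrite author's own statement) =====
-- stated objective: alternative
-- what changed: B replaces the triple nested loop with early return by a single pass that builds a first-occurrence-wins dict from code.upper() to display name (skipping refs without a 'code' key) followed by one dict lookup.
import Mathlib
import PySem

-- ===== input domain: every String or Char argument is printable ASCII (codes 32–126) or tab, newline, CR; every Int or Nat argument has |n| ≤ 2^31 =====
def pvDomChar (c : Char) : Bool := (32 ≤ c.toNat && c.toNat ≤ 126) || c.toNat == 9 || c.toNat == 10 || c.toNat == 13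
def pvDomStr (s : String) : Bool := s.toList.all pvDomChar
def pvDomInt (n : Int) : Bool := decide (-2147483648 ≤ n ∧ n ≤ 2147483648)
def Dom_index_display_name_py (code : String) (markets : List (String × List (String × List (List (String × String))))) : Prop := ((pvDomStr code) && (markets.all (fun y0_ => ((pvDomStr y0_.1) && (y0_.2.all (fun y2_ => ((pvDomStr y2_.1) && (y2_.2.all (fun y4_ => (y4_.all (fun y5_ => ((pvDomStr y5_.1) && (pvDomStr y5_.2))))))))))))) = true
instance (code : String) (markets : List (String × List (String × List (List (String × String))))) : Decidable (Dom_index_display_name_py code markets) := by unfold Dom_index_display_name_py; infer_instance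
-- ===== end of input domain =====

-- ===== PORT A =====
-- B builds a first-occurrence-wins index in one pass instead of A's nested early-return scan (alternative decomposition).
-- A mutates nothing; equivalence is about the return value. Dict literals use PySem.Dict.mk (first match wins on lookup).

-- inner loop 'for ref in refs': return on first matching code; Python raises KeyError when ref lacks "code"
-- (those inputs are outside Pre_); there the port skips the ref.
def pvARefs (cu : String) : List (List (String × String)) → Option String
  | [] => none
  | ref :: rest =>
    match (PySem.Dict.mk ref).get? "code" with
    | none => pvARefs cu rest  -- KeyError in Python; unreached inside Pre_
    | some c =>
      if PySem.Str.upper c = cu then some ((PySem.Dict.mk ref).getD "name" cu)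
      else pvARefs cu rest

-- middle loop 'for _exch, refs in exchanges.items()'
def pvAExchs (cu : String) : List (String × List (List (String × String))) → Option String
  | [] => none
  | e :: rest =>
    match pvARefs cu e.2 with
    | some v => some v
    | none => pvAExchs cu rest

-- outer loop 'for _country, exchanges in markets.items()'
def pvAMarkets (cu : String) : List (String × List (String × List (List (String × String)))) → Option String
  | [] => none
  | m :: rest =>
    match pvAExchs cu m.2 with
    | some v => some v
    | none => pvAMarkets cu rest

def index_display_name_py (code : String) (markets : List (String × List (String × List (List (String × String))))) : String :=
  let cu := PySem.Str.upper code
  (pvAMarkets cu markets).getD cu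

-- ===== PORT B =====
-- one step of B's indexing pass: insert code.upper() ↦ ref.get("name", cu) only if the key is new
def pvAddRef (cu : String) (idx : PySem.Dict String String) (ref : List (String × String)) : PySem.Dict String String :=
  match (PySem.Dict.mk ref).get? "code" with
  | none => idx  -- ref.get("code") is None: skipped
  | some c =>
    let k := PySem.Str.upper c
    if idx.contains k then idx else idx.insert k ((PySem.Dict.mk ref).getD "name" cu)

def index_display_name_py_alt (code : String) (markets : List (String × List (String × List (List (String × String))))) : String :=
  let cu := PySem.Str.upper code
  let idx := markets.foldl (fun idx m => m.2.foldl (fun idx e => e.2.foldl (pvAddRef cu) idx) idx) PySem.Dict.empty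
  idx.getD cu cu

-- ===== PRECONDITION & SPEC =====
-- the refs in document order
def pvFlatRefs (markets : List (String × List (String × List (List (String × String))))) : List (List (String × String)) :=
  markets.flatMap (fun m => m.2.flatMap (fun e => e.2))

-- Pre_ excludes exactly the inputs where Python A raises KeyError: the first ref (in scan order) that
-- either lacks a "code" key or whose code matches code.upper() must not be one lacking the "code" key.
def Pre_index_display_name_py (code : String) (markets : List (String × List (String × List (List (String × String))))) : Prop :=
  (((pvFlatRefs markets).dropWhile (fun ref => ((PySem.Dict.mk ref).get? "code").any (fun c => !(PySem.Str.upper c == PySem.Str.upper code)))).head?.all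
    (fun ref => ((PySem.Dict.mk ref).get? "code").isSome)) = true
instance (code : String) (markets : List (String × List (String × List (List (String × String))))) : Decidable (Pre_index_display_name_py code markets) := by unfold Pre_index_display_name_py; infer_instance

def pvWitness_index_display_name_py : String × (List (String × List (String × List (List (String × String))))) :=
  ("nyse", [("us", [("NYSE", [[("code", "Nyse"), ("name", "New York")]])])])

def Spec_index_display_name_py (code : String) (markets : List (String × List (String × List (List (String × String))))) (out : String) : Prop := out = index_display_name_py_alt code markets
instance (code : String) (markets : List (String × List (String × List (List (String × String))))) (out : String) : Decidable (Spec_index_display_name_py code markets out) := by unfold Spec_index_display_name_py; infer_instance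

-- ===== CLAIM (what is proved, stated in full; the proofs are below) =====
def Claim_equal_index_display_name_py : Prop := ∀ (code : String) (markets : List (String × List (String × List (List (String × String))))), Dom_index_display_name_py code markets → Pre_index_display_name_py code markets → Spec_index_display_name_py code markets (index_display_name_py code markets)

-- ===== LEMMAS AND PROOFS =====

-- A's nested scan is the scan of the flattened ref list
theorem pvARefs_append (cu : String) (l1 l2 : List (List (String × String))) :
    pvARefs cu (l1 ++ l2) = (pvARefs cu l1).or (pvARefs cu l2) := by
  induction l1 with
  | nil => rfl
  | cons ref rest ih =>
    simp only [List.cons_append, pvARefs]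
    cases (PySem.Dict.mk ref).get? "code" with
    | none => exact ih
    | some c =>
      by_cases h : PySem.Str.upper c = cu
      · simp [h]
      · simp [h, ih]

theorem pvAExchs_flat (cu : String) (exs : List (String × List (List (String × String)))) :
    pvAExchs cu exs = pvARefs cu (exs.flatMap (fun e => e.2)) := by
  induction exs with
  | nil => rfl
  | cons e rest ih =>
    simp only [pvAExchs, List.flatMap_cons, pvARefs_append, ih]
    cases pvARefs cu e.2 <;> simp [Option.or]

theorem pvAMarkets_flat (cu : String) (markets : List (String × List (String × List (List (String × String))))) :
    pvAMarkets cu markets = pvARefs cu (pvFlatRefs markets) := by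
  induction markets with
  | nil => rfl
  | cons m rest ih =>
    simp only [pvAMarkets, pvFlatRefs, List.flatMap_cons, pvARefs_append, pvAExchs_flat, ih]
    cases pvARefs cu (m.2.flatMap (fun e => e.2)) <;> simp [Option.or]

-- B's nested folds are the fold over the flattened ref list
theorem pvBfold_flat (cu : String) (markets : List (String × List (String × List (List (String × String))))) (idx : PySem.Dict String String) :
    markets.foldl (fun idx m => m.2.foldl (fun idx e => e.2.foldl (pvAddRef cu) idx) idx) idx
      = (pvFlatRefs markets).foldl (pvAddRef cu) idx := by
  induction markets generalizing idx with
  | nil => rfl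
  | cons m rest ih =>
    simp only [List.foldl_cons, pvFlatRefs, List.flatMap_cons, List.foldl_append, ih]
    congr 1
    induction m.2 generalizing idx with
    | nil => rfl
    | cons e erest eih => simp only [List.foldl_cons, List.flatMap_cons, List.foldl_append, eih]

-- pvAddRef never overwrites an existing key
theorem pvAddRef_preserve (cu j v : String) (idx : PySem.Dict String String) (ref : List (String × String))
    (h : idx.get? j = some v) : (pvAddRef cu idx ref).get? j = some v := by
  unfold pvAddRef
  cases (PySem.Dict.mk ref).get? "code" with
  | none => exact h
  | some c =>
    simp only
    by_cases hc : idx.contains (PySem.Str.upper c)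
    · simp [hc, h]
    · have hne : j ≠ PySem.Str.upper c := by
        intro he
        rw [PySem.Dict.contains_eq_isSome_get?, ← he, h] at hc
        simp at hc
      simp [hc, PySem.Dict.get?_insert_of_ne _ _ hne, h]

-- the fold's final lookup at cu is: an already present binding, else the first match of the scan
theorem pvFold_main (cu : String) (l : List (List (String × String))) (idx : PySem.Dict String String) :
    (l.foldl (pvAddRef cu) idx).get? cu = (idx.get? cu).or (pvARefs cu l) := by
  induction l generalizing idx with
  | nil => cases h : idx.get? cu <;> simp [pvARefs, Option.or, h]
  | cons ref rest ih =>
    simp only [List.foldl_cons, ih, pvARefs]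
    cases hcode : (PySem.Dict.mk ref).get? "code" with
    | none => simp [pvAddRef, hcode]
    | some c =>
      by_cases hm : PySem.Str.upper c = cu
      · cases hidx : idx.get? cu with
        | some v =>
          have : (pvAddRef cu idx ref).get? cu = some v := pvAddRef_preserve cu cu v idx ref hidx
          simp [this, Option.or]
        | none =>
          have hnc : idx.contains (PySem.Str.upper c) = false := by
            rw [PySem.Dict.contains_eq_isSome_get?, hm, hidx]; rfl
          have : (pvAddRef cu idx ref).get? cu = some ((PySem.Dict.mk ref).getD "name" cu) := by
            rw [hm] at hnc
            simp only [pvAddRef, hcode]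
            rw [hm]
            simp [hnc, PySem.Dict.get?_insert_self]
          simp [this, hm, Option.or]
      · have : (pvAddRef cu idx ref).get? cu = idx.get? cu := by
          simp only [pvAddRef, hcode]
          by_cases hc : idx.contains (PySem.Str.upper c)
          · simp [hc]
          · simp [hc, PySem.Dict.get?_insert_of_ne _ _ (fun he => hm he.symm)]
        simp [this, hm]

-- ===== VERDICT (by name: the statement is the Claim_ definition above) =====
theorem index_display_name_py_spec : Claim_equal_index_display_name_py := by
  intro code markets _ _
  unfold Spec_index_display_name_py index_display_name_py index_display_name_py_alt
  simp only [pvAMarkets_flat, pvBfold_flat, PySem.Dict.getD_eq_get?_getD, pvFold_main,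
    PySem.Dict.get?_empty, Option.or]
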